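-- pv_equiv track=rewrite | github.com/danilosupertech/Python_Lab | mission_control.py | list_astronauts
-- ===== SOURCE A (Python) =====
-- def list_astronauts(mission_details):
--     """
--     Cria uma lista ordenada e sem duplicatas de todos os astronautas envolvidos em qualquer missão.
--     A função considera que os nomes dos tripulantes estão separados por vírgulas na string 'Crew'.
--     """
--     astronauts_set = set()  # conjunto para evitar nomes repetidos
--     for details in mission_details.values():
--         crew = details.get('Crew', '')  # obtém a lista de tripulantes, ou string vazia
--         for astronaut in crew.split(','):
--             astronaut = astronaut.strip()  # remove espaços extras
--             if astronaut:
--                 astronauts_set.add(astronaut)  # adiciona ao conjunto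
--     return sorted(astronauts_set)  # retorna lista ordenada
-- ===== SOURCE B (Python) =====
-- def list_astronauts(mission_details):
--     # Flatten all crews into one sorted list of stripped non-empty names
--     # via comprehensions, then drop adjacent duplicates by pairing each
--     # name with its predecessor (zip against the list shifted by one).
--     names = sorted(
--         name
--         for details in mission_details.values()
--         for name in (part.strip() for part in details.get('Crew', '').split(','))
--         if name
--     )
--     return [x for prev, x in zip([None] + names, names) if prev != x]
-- ===== Notes on version B (the rewrite author's own statement) =====
-- stated objective: alternative
-- what changed: Replaces the hash-set accumulation loops with a comprehension-based flatten (flatMap/filter), a sort, and a zip-with-predecessor pass that keeps each name differing from the one before it.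
import Mathlib
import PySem

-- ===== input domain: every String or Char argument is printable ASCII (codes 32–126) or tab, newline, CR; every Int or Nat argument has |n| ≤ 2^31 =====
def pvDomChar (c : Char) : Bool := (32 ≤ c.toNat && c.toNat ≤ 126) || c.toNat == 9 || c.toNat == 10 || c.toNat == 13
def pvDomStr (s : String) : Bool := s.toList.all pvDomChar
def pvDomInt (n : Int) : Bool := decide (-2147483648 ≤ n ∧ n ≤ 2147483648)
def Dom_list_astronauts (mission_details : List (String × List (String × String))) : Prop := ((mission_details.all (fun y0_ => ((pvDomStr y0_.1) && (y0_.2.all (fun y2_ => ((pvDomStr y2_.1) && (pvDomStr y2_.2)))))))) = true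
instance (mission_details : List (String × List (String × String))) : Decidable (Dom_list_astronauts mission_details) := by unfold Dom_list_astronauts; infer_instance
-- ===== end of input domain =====

-- B flattens all crews into one sorted list of stripped non-empty names via
-- comprehensions, then removes adjacent duplicates by zipping each name with
-- its predecessor (alternative decomposition to A's hash-set dedup loops).

-- ===== PORT A =====
def list_astronauts (mission_details : List (String × List (String × String))) : List String :=
  let astronauts_set : PySem.Set String :=
    (PySem.Dict.ofList mission_details).values.foldl
      (fun astronauts_set details =>
        ((PySem.Str.split? ((PySem.Dict.ofList details).getD "Crew" "") ",").getD []).foldl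
          (fun astronauts_set astronaut =>
            let astronaut := PySem.Str.strip astronaut
            if astronaut ≠ "" then PySem.Set.add astronauts_set astronaut else astronauts_set)
          astronauts_set)
      PySem.Set.empty
  PySem.List.sorted astronauts_set (fun x => x) false

-- ===== PORT B =====
-- zip([None] + names, names) pairs each name with its predecessor (None for the first);
-- the comprehension keeps a name when it differs from that predecessor.
def list_astronauts_alt (mission_details : List (String × List (String × String))) : List String :=
  let names : List String :=
    PySem.List.sorted
      ((PySem.Dict.ofList mission_details).values.flatMap (fun details =>
        (((PySem.Str.split? ((PySem.Dict.ofList details).getD "Crew" "") ",").getD []).map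
            PySem.Str.strip).filter (fun name => name != "")))
      (fun x => x) false
  (((none :: names.map some).zip names).filter (fun pc => pc.1 != some pc.2)).map Prod.snd

-- ===== PRECONDITION & SPEC =====
def Spec_list_astronauts (mission_details : List (String × List (String × String))) (out : List String) : Prop := out = list_astronauts_alt mission_details
instance (mission_details : List (String × List (String × String))) (out : List String) : Decidable (Spec_list_astronauts mission_details out) := by unfold Spec_list_astronauts; infer_instance

-- ===== CLAIM (what is proved, stated in full; the proofs are below) =====
def Claim_equal_list_astronauts : Prop := ∀ (mission_details : List (String × List (String × String))), Dom_list_astronauts mission_details → Spec_list_astronauts mission_details (list_astronauts mission_details)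

-- ===== LEMMAS AND PROOFS =====

-- A's inner fold over one crew = adding the stripped non-empty names one by one.
theorem pv_inner_eq (crew : List String) (s : PySem.Set String) :
    crew.foldl (fun astronauts_set astronaut =>
        let astronaut := PySem.Str.strip astronaut
        if astronaut ≠ "" then PySem.Set.add astronauts_set astronaut else astronauts_set) s
      = ((crew.map PySem.Str.strip).filter (fun name => name != "")).foldl PySem.Set.add s := by
  induction crew generalizing s with
  | nil => rfl
  | cons c cs ih =>
      simp only [List.foldl_cons, List.map_cons]
      by_cases h : PySem.Str.strip c ≠ ""
      · rw [if_pos h, List.filter_cons_of_pos (by simpa using h), List.foldl_cons]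
        exact ih _
      · rw [if_neg h, List.filter_cons_of_neg (by simpa using h)]
        exact ih s

-- A's outer fold builds set(flatMap of the filtered stripped names).
theorem pv_set_eq_gen (vals : List (List (String × String))) : ∀ (ns : List String),
    vals.foldl
      (fun astronauts_set details =>
        ((PySem.Str.split? ((PySem.Dict.ofList details).getD "Crew" "") ",").getD []).foldl
          (fun astronauts_set astronaut =>
            let astronaut := PySem.Str.strip astronaut
            if astronaut ≠ "" then PySem.Set.add astronauts_set astronaut else astronauts_set)
          astronauts_set)
      (ns.foldl PySem.Set.add PySem.Set.empty)
    = (ns ++ vals.flatMap (fun details =>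
        (((PySem.Str.split? ((PySem.Dict.ofList details).getD "Crew" "") ",").getD []).map
            PySem.Str.strip).filter (fun name => name != ""))).foldl PySem.Set.add PySem.Set.empty := by
  induction vals with
  | nil => intro ns; simp
  | cons v vs ih =>
      intro ns
      simp only [List.foldl_cons]
      rw [pv_inner_eq, ← List.foldl_append, ih]
      simp

-- dedup-by-predecessor of a (≤)-sorted list, for a generalized predecessor prev
-- that is ≤ every element: strictly increasing, members = members with prev removed.
theorem pv_zip_spec (names : List String) : ∀ (prev : Option String),
    names.Pairwise (· ≤ ·) →
    (∀ p, prev = some p → ∀ a ∈ names, p ≤ a) →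
    ((((prev :: names.map some).zip names).filter (fun pc => pc.1 != some pc.2)).map
        Prod.snd).Pairwise (· < ·)
    ∧ ∀ a, a ∈ (((prev :: names.map some).zip names).filter (fun pc => pc.1 != some pc.2)).map
        Prod.snd ↔ a ∈ names ∧ some a ≠ prev := by
  induction names with
  | nil => intro prev _ _; simp
  | cons x rest ih =>
      intro prev hs hp
      have hs' : rest.Pairwise (· ≤ ·) := hs.tail
      have hxle : ∀ a ∈ rest, x ≤ a := fun a ha => List.rel_of_pairwise_cons hs ha
      obtain ⟨ih1, ih2⟩ := ih (some x) hs' (by rintro p hp' a ha; cases hp'; exact hxle a ha)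
      simp only [List.map_cons, List.zip_cons_cons]
      by_cases hc : prev = some x
      · subst hc
        rw [List.filter_cons_of_neg (by simp)]
        refine ⟨ih1, fun a => ?_⟩
        rw [ih2 a]
        simp only [List.mem_cons, ne_eq, Option.some.injEq]
        tauto
      · rw [List.filter_cons_of_pos (by simpa [bne_iff_ne] using hc), List.map_cons]
        constructor
        · refine List.pairwise_cons.mpr ⟨?_, ih1⟩
          intro b hb
          obtain ⟨hbrest, hbx⟩ := (ih2 b).mp hb
          have hle : x ≤ b := hxle b hbrest
          rcases lt_or_eq_of_le hle with h | h
          · exact h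
          · exact absurd (congrArg some h.symm) hbx
        · intro a
          simp only [List.mem_cons, ih2 a, ne_eq, Option.some.injEq]
          constructor
          · rintro (rfl | ⟨ha, hax⟩)
            · exact ⟨Or.inl rfl, fun h => hc h.symm⟩
            · refine ⟨Or.inr ha, ?_⟩
              intro hap
              have hpa : a ≤ x := hp a hap.symm x (List.mem_cons_self)
              have hxa : x ≤ a := hxle a ha
              exact hax (le_antisymm hpa hxa)
          · rintro ⟨(rfl | ha), hne⟩
            · exact Or.inl rfl
            · by_cases hax : a = x
              · subst hax; exact Or.inl rfl
              · exact Or.inr ⟨ha, hax⟩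

-- ===== VERDICT (by name: the statement is the Claim_ definition above) =====
theorem list_astronauts_spec : Claim_equal_list_astronauts := by
  intro md _
  show list_astronauts md = list_astronauts_alt md
  unfold list_astronauts list_astronauts_alt
  have hset := pv_set_eq_gen (PySem.Dict.ofList md).values []
  simp only [List.foldl_nil, List.nil_append] at hset
  rw [hset]
  set L := (PySem.Dict.ofList md).values.flatMap (fun details =>
      (((PySem.Str.split? ((PySem.Dict.ofList details).getD "Crew" "") ",").getD []).map
          PySem.Str.strip).filter (fun name => name != "")) with hL
  rw [show (List.foldl PySem.Set.add PySem.Set.empty L) = PySem.Set.ofList L from rfl]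
  obtain ⟨hlt, hmem⟩ := pv_zip_spec (PySem.List.sorted L (fun x => x) false) none
      (by simpa using PySem.List.sorted_pairwise L (fun x : String => x))
      (by intro p h; cases h)
  have hrnodup := hlt.imp (fun {a b : String} (h : a < b) => ne_of_lt h)
  refine PySem.List.sorted_eq_of_perm_of_pairwise_lt _ _ _ ?_ hlt
  rw [List.perm_ext_iff_of_nodup hrnodup (PySem.Set.nodup_ofList _)]
  intro a
  rw [hmem a]
  simp [PySem.Set.mem_ofList, PySem.List.mem_sorted]
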